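-- pv_equiv track=rewrite | github.com/SnapeV1/YEFFA_Assistant | matcher.py | _strip_punct_and_symbols
-- ===== SOURCE A (Python) =====
-- import unicodedata
--
-- def _strip_punct_and_symbols(s: str) -> str:
--     out = []
--     for ch in s:
--         cat = unicodedata.category(ch)
--         # Remove punctuation (P*) and symbols (S*). Keep spaces.
--         if cat.startswith('P') or cat.startswith('S'):
--             out.append(' ')
--         else:
--             out.append(ch)
--     return ''.join(out)
-- ===== SOURCE B (Python) =====
-- import unicodedata
--
-- def _strip_punct_and_symbols(s: str) -> str:
--     # Build a translation table once over the distinct characters, then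
--     # translate in a single pass (unmapped characters pass through unchanged).
--     table = {}
--     for ch in set(s):
--         cat = unicodedata.category(ch)
--         if cat.startswith('P') or cat.startswith('S'):
--             table[ord(ch)] = ' '
--     return s.translate(table)
-- ===== Notes on version B (the rewrite author's own statement) =====
-- stated objective: faster
-- what changed: B replaces the per-character build-a-list loop (one unicodedata.category call per character) with a translation table built once over the distinct characters of s, followed by a single str.translate pass in C; category is called once per unique character instead of once per character.
import Mathlib
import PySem

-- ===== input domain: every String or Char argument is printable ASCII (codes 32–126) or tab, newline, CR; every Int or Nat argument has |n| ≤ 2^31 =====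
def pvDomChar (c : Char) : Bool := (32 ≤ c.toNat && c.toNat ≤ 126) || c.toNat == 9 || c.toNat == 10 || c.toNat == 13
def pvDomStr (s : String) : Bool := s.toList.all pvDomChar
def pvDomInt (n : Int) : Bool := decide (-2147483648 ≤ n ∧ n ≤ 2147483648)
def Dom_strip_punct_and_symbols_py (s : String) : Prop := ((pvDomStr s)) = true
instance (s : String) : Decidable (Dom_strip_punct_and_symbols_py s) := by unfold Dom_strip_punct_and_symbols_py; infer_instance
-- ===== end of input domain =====

-- B builds a translation table over the distinct characters and translates in one pass,
-- instead of A's per-character list-building loop (constant-factor faster: category is computed once per distinct character and translate runs in C).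


-- unicodedata.category(ch) starts with 'P' or 'S' — exact for printable ASCII and tab/newline/CR
-- (on that range it holds exactly for the non-alphanumeric characters with codes 33..126)
def pvCatPS (ch : Char) : Bool := (33 ≤ ch.toNat && ch.toNat ≤ 126) && !ch.isAlphanum

-- ===== PORT A =====
def strip_punct_and_symbols_py (s : String) : String :=
  String.ofList (s.toList.foldl
    (fun out ch => out ++ [if pvCatPS ch then ' ' else ch]) ([] : List Char))

-- ===== PORT B =====
-- the translation table: one entry per distinct punctuation/symbol character of s
def pvTable (s : String) : PySem.Dict Char Char :=
  (PySem.Set.ofList s.toList).foldl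
    (fun d ch => if pvCatPS ch then d.insert ch ' ' else d) PySem.Dict.empty

def strip_punct_and_symbols_py_alt (s : String) : String :=
  String.ofList (s.toList.map (fun ch => (pvTable s).getD ch ch))

-- ===== PRECONDITION & SPEC =====
def Spec_strip_punct_and_symbols_py (s : String) (out : String) : Prop := out = strip_punct_and_symbols_py_alt s
instance (s : String) (out : String) : Decidable (Spec_strip_punct_and_symbols_py s out) := by unfold Spec_strip_punct_and_symbols_py; infer_instance

-- ===== CLAIM (what is proved, stated in full; the proofs are below) =====
def Claim_equal_strip_punct_and_symbols_py : Prop := ∀ (s : String), Dom_strip_punct_and_symbols_py s → Spec_strip_punct_and_symbols_py s (strip_punct_and_symbols_py s)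

-- ===== LEMMAS AND PROOFS =====

-- lookup in the table built by the fold: ' ' exactly for the PS characters of the key list
theorem pv_getD_build (l : List Char) (d : PySem.Dict Char Char) (ch : Char) :
    (l.foldl (fun d ch => if pvCatPS ch then d.insert ch ' ' else d) d).getD ch ch
      = if ch ∈ l ∧ pvCatPS ch = true then ' ' else d.getD ch ch := by
  induction l generalizing d with
  | nil => simp
  | cons a l ih =>
    simp only [List.foldl_cons, ih, List.mem_cons]
    by_cases hmem : ch ∈ l ∧ pvCatPS ch = true
    · simp [hmem]
    · by_cases hps : pvCatPS a = true
      · rw [if_pos hps, if_neg hmem, PySem.Dict.getD_insert]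
        by_cases hch : ch = a
        · subst hch; simp [hps]
        · rw [if_neg hch, if_neg]
          rintro ⟨h1, h2⟩
          rcases h1 with rfl | hl
          · exact hch rfl
          · exact hmem ⟨hl, h2⟩
      · rw [if_neg hps, if_neg hmem, if_neg]
        rintro ⟨h1, h2⟩
        rcases h1 with rfl | hl
        · exact hps h2
        · exact hmem ⟨hl, h2⟩

theorem pv_table_getD (s : String) (ch : Char) (h : ch ∈ s.toList) :
    (pvTable s).getD ch ch = if pvCatPS ch then ' ' else ch := by
  unfold pvTable
  rw [pv_getD_build]
  by_cases hps : pvCatPS ch = true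
  · simp [hps, PySem.Set.mem_ofList, h]
  · simp [hps]

-- ===== VERDICT (by name: the statement is the Claim_ definition above) =====
theorem strip_punct_and_symbols_py_spec : Claim_equal_strip_punct_and_symbols_py := by
  intro s _
  unfold Spec_strip_punct_and_symbols_py strip_punct_and_symbols_py strip_punct_and_symbols_py_alt
  rw [PySem.List.foldl_append_singleton_eq_map]
  congr 1
  exact List.map_congr_left (fun ch h => (pv_table_getD s ch h).symm)
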